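-- pv_equiv track=rewrite | github.com/iannil/one-data-studio | services/data-api/services/metadata_graph_builder.py | _calculate_impact_risk
-- ===== SOURCE A (Python) =====
-- from typing import Dict, List, Optional, Any, Set, Tuple
--
-- def _calculate_impact_risk(nodes: List[Dict]) -> Dict:
--     """计算影响风险等级"""
--     risk_levels = {"critical": 0, "high": 0, "medium": 0, "low": 0}
--
--     for node in nodes:
--         node_type = node.get("type")
--         if node_type == "table" or node_type == "dataset":
--             # 如果是生产表或关键数据集，风险较高
--             risk_levels["medium"] = risk_levels.get("medium", 0) + 1
--         elif node_type == "job":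
--             risk_levels["high"] = risk_levels.get("high", 0) + 1
--
--     return risk_levels
-- ===== SOURCE B (Python) =====
-- def _calculate_impact_risk(nodes):
--     """计算影响风险等级 — count all node types first, then build the result directly."""
--     types = [node.get("type") for node in nodes]
--     return {
--         "critical": 0,
--         "high": types.count("job"),
--         "medium": types.count("table") + types.count("dataset"),
--         "low": 0,
--     }
-- ===== Notes on version B (the rewrite author's own statement) =====
-- stated objective: idiomatic
-- what changed: Replaces the per-node branching loop that mutates a dict with a count-then-combine construction: extract all node types once, then build the result dict directly from list.count of the three relevant types.
import Mathlib
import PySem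

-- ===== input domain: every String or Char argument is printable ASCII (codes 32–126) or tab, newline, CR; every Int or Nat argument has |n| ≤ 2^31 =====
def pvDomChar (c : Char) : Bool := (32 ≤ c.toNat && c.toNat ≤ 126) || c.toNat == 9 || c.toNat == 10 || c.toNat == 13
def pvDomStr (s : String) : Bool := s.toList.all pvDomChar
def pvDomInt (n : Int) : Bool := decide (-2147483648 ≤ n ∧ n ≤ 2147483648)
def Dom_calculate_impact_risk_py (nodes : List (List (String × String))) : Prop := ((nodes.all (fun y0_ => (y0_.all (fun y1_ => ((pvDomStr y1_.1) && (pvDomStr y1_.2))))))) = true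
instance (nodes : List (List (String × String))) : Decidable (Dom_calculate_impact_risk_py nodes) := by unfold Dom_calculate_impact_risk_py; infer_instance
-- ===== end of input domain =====

-- B replaces A's per-node branching loop over a mutable dict with a count-then-combine
-- construction (extract all types, count the three relevant ones); same O(n) cost.

-- ===== PORT A =====
def calculate_impact_risk_py (nodes : List (List (String × String))) : List (String × Int) :=
  let init : PySem.Dict String Int :=
    PySem.Dict.ofList [("critical", 0), ("high", 0), ("medium", 0), ("low", 0)]
  (nodes.foldl (fun rl node =>
    let node_type := (PySem.Dict.mk node).get? "type"
    if node_type == some "table" || node_type == some "dataset" then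
      rl.insert "medium" (rl.getD "medium" 0 + 1)
    else if node_type == some "job" then
      rl.insert "high" (rl.getD "high" 0 + 1)
    else rl) init).items

-- ===== PORT B =====
def calculate_impact_risk_py_alt (nodes : List (List (String × String))) : List (String × Int) :=
  let types := nodes.map (fun node => (PySem.Dict.mk node).get? "type")
  [("critical", 0),
   ("high", (types.count (some "job") : Int)),
   ("medium", (types.count (some "table") : Int) + (types.count (some "dataset") : Int)),
   ("low", 0)]

-- ===== PRECONDITION & SPEC =====
def Spec_calculate_impact_risk_py (nodes : List (List (String × String))) (out : List (String × Int)) : Prop := out = calculate_impact_risk_py_alt nodes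
instance (nodes : List (List (String × String))) (out : List (String × Int)) : Decidable (Spec_calculate_impact_risk_py nodes out) := by unfold Spec_calculate_impact_risk_py; infer_instance

-- ===== CLAIM (what is proved, stated in full; the proofs are below) =====
def Claim_equal_calculate_impact_risk_py : Prop := ∀ (nodes : List (List (String × String))), Dom_calculate_impact_risk_py nodes → Spec_calculate_impact_risk_py nodes (calculate_impact_risk_py nodes)

-- ===== LEMMAS AND PROOFS =====

-- A's loop body, named for the proofs (definitionally the lambda in the A port).
def calcStep (rl : PySem.Dict String Int) (node : List (String × String)) : PySem.Dict String Int :=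
  let node_type := (PySem.Dict.mk node).get? "type"
  if node_type == some "table" || node_type == some "dataset" then
    rl.insert "medium" (rl.getD "medium" 0 + 1)
  else if node_type == some "job" then
    rl.insert "high" (rl.getD "high" 0 + 1)
  else rl

-- Invariant of A's loop: the dict always keeps the shape
-- [("critical",0),("high",h),("medium",m),("low",0)] and the loop adds the type counts.
theorem calc_loop_invariant (nodes : List (List (String × String))) (h m : Int) :
    (nodes.foldl calcStep
      (PySem.Dict.mk [("critical", 0), ("high", h), ("medium", m), ("low", 0)])).items
    = [("critical", 0),
       ("high", h + ((nodes.map (fun node => (PySem.Dict.mk node).get? "type")).count (some "job") : Int)),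
       ("medium", m + ((nodes.map (fun node => (PySem.Dict.mk node).get? "type")).count (some "table") : Int)
                    + ((nodes.map (fun node => (PySem.Dict.mk node).get? "type")).count (some "dataset") : Int)),
       ("low", 0)] := by
  induction nodes generalizing h m with
  | nil => simp
  | cons node rest ih =>
    rw [List.foldl_cons]
    by_cases ht : (PySem.Dict.mk node).get? "type" = some "table"
    · have hstep : calcStep (PySem.Dict.mk [("critical", 0), ("high", h), ("medium", m), ("low", 0)]) node
          = PySem.Dict.mk [("critical", 0), ("high", h), ("medium", m + 1), ("low", 0)] := by
        simp [calcStep, ht, beq_iff_eq, PySem.Dict.insert, PySem.Dict.getD, PySem.Dict.get?_mk_cons]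
      rw [hstep, ih]
      simp [ht]
      ring
    · by_cases hd : (PySem.Dict.mk node).get? "type" = some "dataset"
      · have hstep : calcStep (PySem.Dict.mk [("critical", 0), ("high", h), ("medium", m), ("low", 0)]) node
            = PySem.Dict.mk [("critical", 0), ("high", h), ("medium", m + 1), ("low", 0)] := by
          simp [calcStep, hd, beq_iff_eq, PySem.Dict.insert, PySem.Dict.getD, PySem.Dict.get?_mk_cons]
        rw [hstep, ih]
        simp [hd]
        ring
      · by_cases hj : (PySem.Dict.mk node).get? "type" = some "job"
        · have hstep : calcStep (PySem.Dict.mk [("critical", 0), ("high", h), ("medium", m), ("low", 0)]) node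
              = PySem.Dict.mk [("critical", 0), ("high", h + 1), ("medium", m), ("low", 0)] := by
            simp [calcStep, hj, beq_iff_eq, PySem.Dict.insert, PySem.Dict.getD, PySem.Dict.get?_mk_cons]
          rw [hstep, ih]
          simp [hj]
          ring
        · have hstep : calcStep (PySem.Dict.mk [("critical", 0), ("high", h), ("medium", m), ("low", 0)]) node
              = PySem.Dict.mk [("critical", 0), ("high", h), ("medium", m), ("low", 0)] := by
            simp [calcStep, ht, hd, hj, beq_iff_eq]
          rw [hstep, ih]
          simp [ht, hd, hj]

-- ===== VERDICT (by name: the statement is the Claim_ definition above) =====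
theorem calculate_impact_risk_py_spec : Claim_equal_calculate_impact_risk_py := by
  intro nodes _
  show calculate_impact_risk_py nodes = calculate_impact_risk_py_alt nodes
  have h := calc_loop_invariant nodes 0 0
  simp only [zero_add] at h
  exact h
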